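-- pv_equiv track=rewrite | github.com/jianglinjieGD/ruanjian003 | litlleCat/controller/allMovies_blueprint.py | invalidWord
-- ===== SOURCE A (Python) =====
-- def invalidWord(strIn):
--     length = 0
--     strNew = ""
--
--     set_alpha = {"a", "b", "c", "c", "d", "e", "f", "g", "h", "i", "j", "k", "l", "m", "n", "o", "p", "q",
--                  "r", "s", "t", "u", "v", "w", "x", "y", "z", "A", "B", "C", "D", "E", "F", "G", "H", "I",
--                  "J", "K", "L", "M", "N", "O", "P", "Q", "R", "S", "T", "U", "V", "W", "X", "Y", "Z", "1",
--                  "2", "3", "4", "5", "6", "7", "8", "9", "0" }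
--
--     for ch in strIn:
--         if ch in set_alpha:
--             length += 1
--         else:
--             length = 0
--
--         if length >= 20:
--             strNew += "- "
--             length = 0
--         strNew += ch
--
--     return strNew
-- ===== SOURCE B (Python) =====
-- ALNUM = set("abcdefghijklmnopqrstuvwxyz"
--             "ABCDEFGHIJKLMNOPQRSTUVWXYZ"
--             "1234567890")
--
--
-- def invalidWord(strIn):
--     # Split the string into maximal runs of alnum / non-alnum characters;
--     # emit non-alnum runs verbatim and chunk alnum runs with "- " before
--     # every in-run index k with k % 20 == 19.
--     out = []
--     i, n = 0, len(strIn)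
--     while i < n:
--         is_a = strIn[i] in ALNUM
--         j = i
--         while j < n and (strIn[j] in ALNUM) == is_a:
--             j += 1
--         run = strIn[i:j]
--         if is_a:
--             for k, ch in enumerate(run):
--                 if k % 20 == 19:
--                     out.append("- ")
--                 out.append(ch)
--         else:
--             out.append(run)
--         i = j
--     return "".join(out)
-- ===== Notes on version B (the rewrite author's own statement) =====
-- stated objective: alternative
-- what changed: Replaced A's flat character loop carrying a reset counter by a run decomposition: split the string into maximal alnum/non-alnum runs, copy non-alnum runs verbatim, and insert the break marker inside each alnum run before every position whose in-run index is congruent to 19 mod 20.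
import Mathlib
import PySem

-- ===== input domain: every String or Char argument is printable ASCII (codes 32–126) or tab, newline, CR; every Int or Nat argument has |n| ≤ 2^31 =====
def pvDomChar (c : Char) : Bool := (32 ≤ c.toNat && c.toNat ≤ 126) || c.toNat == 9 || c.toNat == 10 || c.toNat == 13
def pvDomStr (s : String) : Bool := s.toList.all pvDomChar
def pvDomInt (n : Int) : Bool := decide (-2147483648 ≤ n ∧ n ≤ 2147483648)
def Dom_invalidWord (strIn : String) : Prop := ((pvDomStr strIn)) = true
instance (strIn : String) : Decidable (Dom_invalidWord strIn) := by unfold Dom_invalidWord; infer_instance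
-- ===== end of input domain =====

-- B replaces A's flat stateful loop by a group-then-chunk decomposition (maximal
-- alnum/non-alnum runs; break marker before in-run index k with k % 20 == 19); objective: alternative.

-- ===== PORT A =====
-- A's set literal of alphanumeric ASCII characters
def setAlpha : List Char :=
  "abcdefghijklmnopqrstuvwxyzABCDEFGHIJKLMNOPQRSTUVWXYZ1234567890".toList

-- one iteration of A's for-loop body (state = (length, strNew))
def stepA (st : Int × List Char) (ch : Char) : Int × List Char :=
  let len1 : Int := if setAlpha.contains ch then st.1 + 1 else 0
  let st1 : Int × List Char :=
    if len1 ≥ 20 then (0, st.2 ++ ['-', ' ']) else (len1, st.2)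
  (st1.1, st1.2 ++ [ch])

def invalidWord (strIn : String) : String :=
  String.mk (strIn.toList.foldl stepA (0, [])).2

-- ===== PORT B =====
-- Source B's ALNUM set (same characters, built as a Python set)
def alnumB : PySem.Set Char :=
  PySem.Set.ofList "abcdefghijklmnopqrstuvwxyzABCDEFGHIJKLMNOPQRSTUVWXYZ1234567890".toList

-- the inner 'for k, ch in enumerate(run)' loop of Source B
def chunkB (run : List Char) : List Char :=
  (PySem.List.enumerate run).flatMap
    (fun p => if p.1 % 20 == 19 then ['-', ' ', p.2] else [p.2])

-- Source B's outer while loop: peel one maximal run per step (fuel bounds the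
-- number of iterations; fuel = length of the list suffices, one char is
-- consumed per step)
def goB : Nat → List Char → List Char
  | 0, _ => []
  | _, [] => []
  | fuel + 1, c :: rest =>
    let isa := PySem.Set.contains alnumB c
    let run := (c :: rest).takeWhile (fun x => PySem.Set.contains alnumB x == isa)
    let rest' := (c :: rest).dropWhile (fun x => PySem.Set.contains alnumB x == isa)
    (if isa then chunkB run else run) ++ goB fuel rest'

def invalidWord_alt (strIn : String) : String :=
  String.mk (goB strIn.toList.length strIn.toList)

-- ===== PRECONDITION & SPEC =====
def Spec_invalidWord (strIn : String) (out : String) : Prop := out = invalidWord_alt strIn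
instance (strIn : String) (out : String) : Decidable (Spec_invalidWord strIn out) := by unfold Spec_invalidWord; infer_instance

-- ===== CLAIM (what is proved, stated in full; the proofs are below) =====
def Claim_equal_invalidWord : Prop := ∀ (strIn : String), Dom_invalidWord strIn → Spec_invalidWord strIn (invalidWord strIn)

-- ===== LEMMAS AND PROOFS =====

-- A's loop, rewritten with the emitted output in recursion position
def aLoop : List Char → Int → List Char
  | [], _ => []
  | ch :: rest, len =>
    let len1 : Int := if ch ∈ setAlpha then len + 1 else 0
    if len1 ≥ 20 then '-' :: ' ' :: ch :: aLoop rest 0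
    else ch :: aLoop rest len1

-- the two ports test the same character set
set_option maxRecDepth 100000 in
theorem alnumB_eq : (alnumB : List Char) = setAlpha := by decide

theorem fold_eq_aLoop (l : List Char) (len : Int) (acc : List Char) :
    (l.foldl stepA (len, acc)).2 = acc ++ aLoop l len := by
  induction l generalizing len acc with
  | nil => simp [aLoop]
  | cons c r ih =>
    rw [List.foldl_cons]
    by_cases h : c ∈ setAlpha
    · by_cases h2 : (20 : Int) ≤ len + 1
      · have hs : stepA (len, acc) c = (0, acc ++ ['-', ' ', c]) := by
          simp [stepA, h, h2]
        rw [hs, ih]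
        simp [aLoop, h, h2]
      · have hs : stepA (len, acc) c = (len + 1, acc ++ [c]) := by
          simp [stepA, h, h2]
        rw [hs, ih]
        simp [aLoop, h, h2]
    · have hs : stepA (len, acc) c = (0, acc ++ [c]) := by
        simp [stepA, h]
      rw [hs, ih]
      simp [aLoop, h]

theorem aLoop_cons_nonal (c : Char) (rest : List Char) (len : Int)
    (h : c ∉ setAlpha) :
    aLoop (c :: rest) len = c :: aLoop rest 0 := by
  simp [aLoop, h]

theorem aLoop_nonal_run (run : List Char) (h : ∀ c ∈ run, c ∉ setAlpha)
    (hne : run ≠ []) (rest : List Char) (len : Int) :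
    aLoop (run ++ rest) len = run ++ aLoop rest 0 := by
  induction run generalizing len with
  | nil => exact absurd rfl hne
  | cons c r ih =>
    rw [List.cons_append, aLoop_cons_nonal c _ len (h c (by simp))]
    cases r with
    | nil => simp
    | cons d t =>
      rw [ih (fun x hx => h x (by simp [hx])) (by simp) 0]
      simp

-- emission for an alnum run starting at in-run index k
def emitE : Nat → List Char → List Char
  | _, [] => []
  | k, c :: r => (if k % 20 = 19 then ['-', ' ', c] else [c]) ++ emitE (k + 1) r

theorem aLoop_al_run (run : List Char) (h : ∀ c ∈ run, c ∈ setAlpha)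
    (k : Nat) (rest : List Char) :
    aLoop (run ++ rest) ((k % 20 : Nat) : Int) =
      emitE k run ++ aLoop rest (((k + run.length) % 20 : Nat) : Int) := by
  induction run generalizing k with
  | nil => simp [emitE]
  | cons c r ih =>
    have hc : c ∈ setAlpha := h c (by simp)
    have hr : ∀ x ∈ r, x ∈ setAlpha := fun x hx => h x (by simp [hx])
    have hk : k % 20 < 20 := Nat.mod_lt _ (by norm_num)
    rw [List.cons_append]
    by_cases h19 : k % 20 = 19
    · have hb : (20 : Int) ≤ ((k % 20 : Nat) : Int) + 1 := by omega
      have lhs : aLoop (c :: (r ++ rest)) ((k % 20 : Nat) : Int)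
          = '-' :: ' ' :: c :: aLoop (r ++ rest) 0 := by
        simp [aLoop, hc]
        intro hlt
        exfalso
        omega
      have h0 : (((k + 1) % 20 : Nat) : Int) = 0 := by
        have : (k + 1) % 20 = 0 := by omega
        simp [this]
      have hih := ih hr (k + 1)
      rw [h0] at hih
      have harg : k + 1 + r.length = k + (r.length + 1) := by omega
      rw [harg] at hih
      rw [lhs, hih]
      simp [emitE, h19]
    · have hb : ¬ ((20 : Int) ≤ ((k % 20 : Nat) : Int) + 1) := by omega
      have h1 : ((k % 20 : Nat) : Int) + 1 = (((k + 1) % 20 : Nat) : Int) := by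
        have : (k + 1) % 20 = k % 20 + 1 := by omega
        simp [this]
      have lhs : aLoop (c :: (r ++ rest)) ((k % 20 : Nat) : Int)
          = c :: aLoop (r ++ rest) (((k + 1) % 20 : Nat) : Int) := by
        rw [← h1]
        simp [aLoop, hc]
        intro hlt
        exfalso
        omega
      have hih := ih hr (k + 1)
      have harg : k + 1 + r.length = k + (r.length + 1) := by omega
      rw [harg] at hih
      rw [lhs, hih]
      simp [emitE, h19]

theorem enumerate_flatMap_eq_emitE (run : List Char) (s : Nat) :
    (PySem.List.enumerate run (s : Int)).flatMap
      (fun p => if p.1 % 20 == 19 then ['-', ' ', p.2] else [p.2]) = emitE s run := by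
  induction run generalizing s with
  | nil => simp [PySem.List.enumerate_nil, emitE]
  | cons c r ih =>
    rw [PySem.List.enumerate_cons, List.flatMap_cons]
    have hcast : ((s : Int) + 1) = ((s + 1 : Nat) : Int) := by push_cast; ring
    rw [hcast, ih (s + 1)]
    by_cases h : s % 20 = 19
    · have hb : ((s : Int) % 20 == 19) = true := by
        simp only [beq_iff_eq]; omega
      simp [emitE, hb, h]
    · have hb : ((s : Int) % 20 == 19) = false := by
        simp only [beq_eq_false_iff_ne, ne_eq]; omega
      simp [emitE, hb, h]

theorem chunkB_eq_emitE (run : List Char) : chunkB run = emitE 0 run := by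
  have h := enumerate_flatMap_eq_emitE run 0
  simpa [chunkB] using h

theorem dropWhile_head_false {α : Type} (p : α → Bool) (l : List α) (d : α) (t : List α)
    (h : l.dropWhile p = d :: t) : p d = false := by
  induction l generalizing d t with
  | nil => simp [List.dropWhile] at h
  | cons a r ih =>
    by_cases hp : p a
    · rw [List.dropWhile_cons, if_pos hp] at h
      exact ih _ _ h
    · rw [List.dropWhile_cons, if_neg hp] at h
      cases h
      simpa using hp

theorem aLoop_eq_goB (n : Nat) (l : List Char) (hn : l.length ≤ n) :
    aLoop l 0 = goB n l := by
  induction n generalizing l with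
  | zero =>
    have hl : l = [] := List.eq_nil_of_length_eq_zero (Nat.le_zero.mp hn)
    subst hl
    rfl
  | succ n ih =>
    cases l with
    | nil => rfl
    | cons c rest =>
      show aLoop (c :: rest) 0 = _ ++ goB n _
      set isa := PySem.Set.contains alnumB c with hisa
      set p := fun x => PySem.Set.contains alnumB x == isa with hp
      have hpc : p c = true := by rw [hp]; exact beq_self_eq_true isa
      have hsplit : (c :: rest) = (c :: rest).takeWhile p ++ (c :: rest).dropWhile p :=
        (List.takeWhile_append_dropWhile).symm
      have hrunmem : ∀ x ∈ (c :: rest).takeWhile p, PySem.Set.contains alnumB x = isa := by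
        intro x hx
        have := List.mem_takeWhile_imp hx
        simpa [hp] using this
      have hlen : ((c :: rest).dropWhile p).length ≤ n := by
        have h1 : ((c :: rest).dropWhile p).length < (c :: rest).length := by
          rw [List.dropWhile_cons, if_pos hpc]
          exact Nat.lt_succ_of_le (List.length_dropWhile_le _ _)
        have hb2 : (c :: rest).length = rest.length + 1 := rfl
        simp only [List.length_cons] at h1
        omega
      by_cases hali : isa = true
      · have hal : ∀ x ∈ (c :: rest).takeWhile p, x ∈ setAlpha := by
          intro x hx
          have hx2 := hrunmem x hx
          rw [hali] at hx2
          have : x ∈ (alnumB : List Char) := by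
            simpa [PySem.Set.contains] using hx2
          rwa [alnumB_eq] at this
        have hrest : aLoop ((c :: rest).dropWhile p)
            (((0 + ((c :: rest).takeWhile p).length) % 20 : Nat) : Int)
            = aLoop ((c :: rest).dropWhile p) 0 := by
          cases hd : (c :: rest).dropWhile p with
          | nil => simp [aLoop]
          | cons d t =>
            have hpd : p d = false := dropWhile_head_false p (c :: rest) d t hd
            have hdna : d ∉ setAlpha := by
              intro hmem
              have : PySem.Set.contains alnumB d = true := by
                simp [PySem.Set.contains, alnumB_eq, hmem]
              rw [hp] at hpd
              simp only [this, hali] at hpd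
              exact absurd hpd (by simp)
            rw [aLoop_cons_nonal d t _ hdna, aLoop_cons_nonal d t 0 hdna]
        have h0 : (0 : Int) = ((0 % 20 : Nat) : Int) := by simp
        calc aLoop (c :: rest) 0
            = aLoop ((c :: rest).takeWhile p ++ (c :: rest).dropWhile p)
                ((0 % 20 : Nat) : Int) := by rw [← hsplit, ← h0]
          _ = emitE 0 ((c :: rest).takeWhile p) ++
                aLoop ((c :: rest).dropWhile p)
                  (((0 + ((c :: rest).takeWhile p).length) % 20 : Nat) : Int) :=
              aLoop_al_run _ hal 0 _
          _ = emitE 0 ((c :: rest).takeWhile p) ++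
                aLoop ((c :: rest).dropWhile p) 0 := by rw [hrest]
          _ = (if isa then chunkB ((c :: rest).takeWhile p)
                 else (c :: rest).takeWhile p) ++ goB n ((c :: rest).dropWhile p) := by
              rw [ih _ hlen, hali, if_pos rfl, chunkB_eq_emitE]
      · have hisaf : isa = false := by
          cases hq : isa
          · rfl
          · exact absurd hq hali
        have hnal : ∀ x ∈ (c :: rest).takeWhile p, x ∉ setAlpha := by
          intro x hx hmem
          have hx2 := hrunmem x hx
          rw [hisaf] at hx2
          have : PySem.Set.contains alnumB x = true := by
            simp [PySem.Set.contains, alnumB_eq, hmem]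
          rw [this] at hx2
          exact absurd hx2 (by simp)
        have hrunne : (c :: rest).takeWhile p ≠ [] := by
          simp [hpc]
        calc aLoop (c :: rest) 0
            = aLoop ((c :: rest).takeWhile p ++ (c :: rest).dropWhile p) 0 := by
              rw [← hsplit]
          _ = (c :: rest).takeWhile p ++ aLoop ((c :: rest).dropWhile p) 0 :=
              aLoop_nonal_run _ hnal hrunne _ 0
          _ = (if isa then chunkB ((c :: rest).takeWhile p)
                 else (c :: rest).takeWhile p) ++ goB n ((c :: rest).dropWhile p) := by
              rw [ih _ hlen, hisaf, if_neg (by simp)]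

-- ===== VERDICT (by name: the statement is the Claim_ definition above) =====
theorem invalidWord_spec : Claim_equal_invalidWord := by
  intro strIn _
  unfold Spec_invalidWord invalidWord invalidWord_alt
  rw [fold_eq_aLoop, List.nil_append,
    aLoop_eq_goB strIn.toList.length strIn.toList (le_refl _)]
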